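-- pv_equiv track=rewrite | github.com/Winters0727/Python-Algorithm-Interview | programmers/Code Challenge 1/stringBeautiful.py | solution
-- ===== SOURCE A (Python) =====
-- def solution(s):
--     answer = 0
--     length = len(s)
--     for i in range(length):
--         for j in range(length-1, i, -1):
--             left, right = i, j
--             while left < right:
--                 if s[left] != s[right]:
--                     answer += (right - left)
--                     break
--                 right -= 1
--     return answer
-- ===== SOURCE B (Python) =====
-- def solution(s):
--     n = len(s)
--     answer = 0
--     for i in range(n):
--         c = s[i]
--         last = i  # last index in (i, j] with s[last] != c; i means "none yet"
--         for j in range(i + 1, n):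
--             if s[j] != c:
--                 last = j
--             answer += last - i
--     return answer
-- ===== Notes on version B (the rewrite author's own statement) =====
-- stated objective: faster
-- what changed: A runs an inner while-scan for every pair (i,j) looking for the nearest index right of i that differs from s[i]; B keeps, in one left-to-right sweep per i, the last index j with s[j] != s[i] and adds its distance in O(1) per j, removing the innermost scan.
import Mathlib
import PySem

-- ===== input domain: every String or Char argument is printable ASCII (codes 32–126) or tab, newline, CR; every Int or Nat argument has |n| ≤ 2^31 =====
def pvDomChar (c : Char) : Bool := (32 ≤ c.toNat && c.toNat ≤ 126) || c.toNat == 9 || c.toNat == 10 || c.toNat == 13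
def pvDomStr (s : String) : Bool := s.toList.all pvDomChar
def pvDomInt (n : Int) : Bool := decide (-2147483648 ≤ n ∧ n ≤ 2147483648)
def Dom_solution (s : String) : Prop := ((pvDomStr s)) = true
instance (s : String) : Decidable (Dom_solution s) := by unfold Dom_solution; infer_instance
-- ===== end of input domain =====

-- B replaces A's per-pair inner while-scan by a single per-i sweep that maintains the last
-- differing index, turning O(n^3) into O(n^2) (objective: faster).

-- ===== PORT A =====
-- the 'while left < right' loop: returns the contribution it adds to answer (0 if it exhausts)
def solWhile (cs : List Char) (left right : Int) : Int :=
  if _h : left < right then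
    if PySem.List.pyGet? cs left ≠ PySem.List.pyGet? cs right then right - left
    else solWhile cs left (right - 1)
  else 0
termination_by (right - left).toNat
decreasing_by omega

def solution (s : String) : Int :=
  let cs := s.toList
  let n : Int := cs.length
  (PySem.List.pyRange 0 n 1).foldl (fun answer i =>
    (PySem.List.pyRange (n - 1) i (-1)).foldl (fun answer j =>
      answer + solWhile cs i j) answer) 0

-- ===== PORT B =====
def solution_alt (s : String) : Int :=
  let cs := s.toList
  let n := cs.length
  (List.range n).foldl (fun (answer : Int) (i : Nat) =>
    let c := PySem.List.pyGet? cs (i : Int)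
    ((List.range' (i + 1) (n - (i + 1))).foldl
      (fun (st : Int × Nat) (j : Nat) =>
        let last := if PySem.List.pyGet? cs (j : Int) ≠ c then j else st.2
        (st.1 + ((last : Int) - (i : Int)), last))
      (answer, i)).1) 0

-- ===== PRECONDITION & SPEC =====
def Spec_solution (s : String) (out : Int) : Prop := out = solution_alt s
instance (s : String) (out : Int) : Decidable (Spec_solution s out) := by unfold Spec_solution; infer_instance

-- ===== CLAIM (what is proved, stated in full; the proofs are below) =====
def Claim_equal_solution : Prop := ∀ (s : String), Dom_solution s → Spec_solution s (solution s)

-- ===== LEMMAS AND PROOFS =====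

-- last index r in (i, j] with cs[r] ≠ cs[i], or i if there is none
def lastD (cs : List Char) (i : Nat) (j : Nat) : Nat :=
  if _h : i < j then
    (if PySem.List.pyGet? cs (j : Int) ≠ PySem.List.pyGet? cs (i : Int) then j
     else lastD cs i (j - 1))
  else i
termination_by j
decreasing_by omega

lemma solWhile_eq (cs : List Char) (i : Nat) :
    ∀ j : Nat, solWhile cs (i : Int) ((j : Nat) : Int) = (lastD cs i j : Int) - (i : Int) := by
  intro j
  induction j with
  | zero =>
    rw [solWhile, lastD]
    simp
  | succ j ih =>
    rw [solWhile, lastD]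
    by_cases hij : i < j + 1
    · have hij' : (i : Int) < ((j + 1 : Nat) : Int) := by exact_mod_cast hij
      rw [dif_pos hij', dif_pos hij]
      by_cases hne : PySem.List.pyGet? cs ((j + 1 : Nat) : Int) = PySem.List.pyGet? cs (i : Int)
      · rw [if_neg (fun h => h hne.symm), if_neg (fun h => h hne)]
        have heq : (((j + 1 : Nat) : Int) - 1) = ((j : Nat) : Int) := by push_cast; ring
        rw [heq, ih]
        norm_num
      · rw [if_pos (Ne.symm hne), if_pos hne]
    · have hij' : ¬ (i : Int) < ((j + 1 : Nat) : Int) := by exact_mod_cast hij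
      rw [dif_neg hij', dif_neg hij]
      simp

lemma lastD_self (cs : List Char) (i : Nat) : lastD cs i i = i := by
  rw [lastD]; simp

-- B's inner loop: accumulates the sum of (lastD · - i) over the scanned range
lemma bInner (cs : List Char) (i : Nat) :
    ∀ (m t : Nat) (acc : Int),
    ((List.range' (i + 1 + t) m).foldl
      (fun (st : Int × Nat) (j : Nat) =>
        (st.1 + (((if PySem.List.pyGet? cs (j : Int) ≠ PySem.List.pyGet? cs (i : Int) then j else st.2 : Nat) : Int) - (i : Int)),
         if PySem.List.pyGet? cs (j : Int) ≠ PySem.List.pyGet? cs (i : Int) then j else st.2))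
      (acc, lastD cs i (i + t))).1
    = acc + ((List.range' (i + 1 + t) m).map (fun j => (lastD cs i j : Int) - (i : Int))).sum := by
  intro m
  induction m with
  | zero => intro t acc; simp
  | succ m ih =>
    intro t acc
    rw [List.range'_succ]
    have hstep : (if PySem.List.pyGet? cs ((i + 1 + t : Nat) : Int) ≠ PySem.List.pyGet? cs (i : Int)
        then (i + 1 + t) else lastD cs i (i + t)) = lastD cs i (i + 1 + t) := by
      conv_rhs => rw [lastD]
      have h1 : i < i + 1 + t := by omega
      rw [dif_pos h1]
      have h2 : i + 1 + t - 1 = i + t := by omega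
      rw [h2]
    simp only [List.foldl_cons, List.map_cons, List.sum_cons]
    rw [hstep]
    rw [show i + 1 + t = i + (t + 1) from by omega]
    rw [show i + (t + 1) + 1 = i + 1 + (t + 1) from by omega]
    rw [ih (t + 1) (acc + ((lastD cs i (i + (t + 1)) : Int) - (i : Int)))]
    ring

-- the per-i bodies of A's and B's outer folds agree
lemma body_eq (cs : List Char) (i : Nat) (acc : Int) :
    (PySem.List.pyRange ((cs.length : Int) - 1) (i : Int) (-1)).foldl
      (fun answer j => answer + solWhile cs (i : Int) j) acc
    = ((List.range' (i + 1) (cs.length - (i + 1))).foldl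
        (fun (st : Int × Nat) (j : Nat) =>
          let last := if PySem.List.pyGet? cs (j : Int) ≠ PySem.List.pyGet? cs (i : Int) then j else st.2
          (st.1 + ((last : Int) - (i : Int)), last))
        (acc, i)).1 := by
  have hB := bInner cs i (cs.length - (i + 1)) 0 acc
  simp only [Nat.add_zero] at hB
  rw [lastD_self] at hB
  have hA : (PySem.List.pyRange ((cs.length : Int) - 1) (i : Int) (-1)).foldl
      (fun answer j => answer + solWhile cs (i : Int) j) acc
      = acc + ((List.range' (i + 1) (cs.length - (i + 1))).map
          (fun j => (lastD cs i j : Int) - (i : Int))).sum := by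
    rw [PySem.List.pyRange_neg_one_eq_reverse]
    rw [show ((cs.length : Int) - 1 + 1) = (cs.length : Int) from by ring]
    rw [PySem.List.foldl_add]
    rw [List.map_reverse, List.sum_reverse]
    congr 1
    rw [PySem.List.pyRange_one]
    rw [show (((cs.length : Int)) - ((i : Int) + 1)).toNat = cs.length - (i + 1) from by omega]
    rw [List.range'_eq_map_range]
    rw [List.map_map, List.map_map]
    refine congrArg List.sum ?_
    apply List.map_congr_left
    intro k _
    simp only [Function.comp]
    rw [show ((i : Int) + 1 + (k : Int)) = ((i + 1 + k : Nat) : Int) from by push_cast; ring]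
    rw [solWhile_eq]
  exact hA.trans hB.symm

-- ===== VERDICT (by name: the statement is the Claim_ definition above) =====
theorem solution_spec : Claim_equal_solution := by
  intro s _
  unfold Spec_solution solution solution_alt
  simp only []
  rw [PySem.List.pyRange_zero_natCast]
  rw [List.foldl_map]
  have hfun : (fun (answer : Int) (i : Nat) =>
      (PySem.List.pyRange ((s.toList.length : Int) - 1) ((i : Nat) : Int) (-1)).foldl
        (fun answer j => answer + solWhile s.toList ((i : Nat) : Int) j) answer)
    = (fun (answer : Int) (i : Nat) =>
      ((List.range' (i + 1) (s.toList.length - (i + 1))).foldl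
        (fun (st : Int × Nat) (j : Nat) =>
          let last := if PySem.List.pyGet? s.toList (j : Int) ≠ PySem.List.pyGet? s.toList (i : Int) then j else st.2
          (st.1 + ((last : Int) - (i : Int)), last))
        (answer, i)).1) := by
    funext answer i
    exact body_eq s.toList i answer
  rw [hfun]
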